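-- pv_equiv track=rewrite | github.com/6210qwe/leetcode_py | leetcode_solutions/by_id/q1118.py | can_divide_into_increasing_sequences
-- ===== SOURCE A (Python) =====
-- from typing import List, Optional
-- from collections import Counter
--
-- def can_divide_into_increasing_sequences(nums: List[int], k: int) -> bool:
--     """
--     判断是否可以将数组分成 k 个递增序列
--     """
--     # 统计每个元素的频率
--     counter = Counter(nums)
--
--     # 按元素值从小到大排序
--     sorted_nums = sorted(counter.keys())
--
--     # 初始化 k 个空的子序列
--     subsequences = [[] for _ in range(k)]
--
--     for num in sorted_nums:
--         count = counter[num]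
--         if count > k:
--             return False  # 如果某个元素的频率大于 k，则无法分成 k 个递增序列
--
--         # 尽可能多地分配当前元素到各个子序列中
--         for i in range(count):
--             for j in range(k):
--                 if not subsequences[j] or subsequences[j][-1] < num:
--                     subsequences[j].append(num)
--                     break
--             else:
--                 return False  # 无法分配当前元素
--
--     return True
-- ===== SOURCE B (Python) =====
-- from typing import List
-- from collections import Counter
--
-- def can_divide_into_increasing_sequences(nums: List[int], k: int) -> bool:
--     # feasible iff no value occurs more than k times
--     return all(c <= k for c in Counter(nums).values())
-- ===== Notes on version B (the rewrite author's own statement) =====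
-- stated objective: faster
-- what changed: A simulates distributing each copy of each sorted value into k greedy subsequences; B observes that the split exists iff no value's frequency exceeds k and just checks all counter values in one pass.
import Mathlib
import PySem

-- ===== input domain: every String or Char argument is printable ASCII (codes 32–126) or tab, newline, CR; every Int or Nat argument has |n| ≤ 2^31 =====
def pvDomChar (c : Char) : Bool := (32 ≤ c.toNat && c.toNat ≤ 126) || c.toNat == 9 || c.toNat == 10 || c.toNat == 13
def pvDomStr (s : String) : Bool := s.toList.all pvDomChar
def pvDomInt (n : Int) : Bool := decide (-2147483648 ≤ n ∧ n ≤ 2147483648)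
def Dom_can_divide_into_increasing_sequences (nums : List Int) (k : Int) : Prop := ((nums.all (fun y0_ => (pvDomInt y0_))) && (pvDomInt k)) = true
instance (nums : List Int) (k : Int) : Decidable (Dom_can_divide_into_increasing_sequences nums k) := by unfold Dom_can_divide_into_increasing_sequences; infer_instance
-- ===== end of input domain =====

-- B replaces A's greedy k-subsequence simulation by a single frequency check (all counts ≤ k); objective: faster.

-- ===== PORT A =====
-- 'not subsequences[j] or subsequences[j][-1] < num'
def pvAvail (num : Int) (s : List Int) : Bool :=
  match s.getLast? with
  | none => true
  | some x => decide (x < num)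

-- the inner 'for j in range(k): … break / else: return False' scan
def pvPlaceOne (num : Int) : List (List Int) → Option (List (List Int))
  | [] => none
  | s :: rest =>
    if pvAvail num s then some ((s ++ [num]) :: rest)
    else (pvPlaceOne num rest).map (s :: ·)

-- 'for i in range(count): …'
def pvPlaceCount (num : Int) : Nat → List (List Int) → Option (List (List Int))
  | 0, subs => some subs
  | c + 1, subs =>
    match pvPlaceOne num subs with
    | none => none
    | some subs' => pvPlaceCount num c subs'

-- 'for num in sorted_nums: …'
def pvLoopA (counter : PySem.Dict Int Int) (k : Int) : List Int → List (List Int) → Bool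
  | [], _ => true
  | num :: rest, subs =>
    let count := counter.getD num 0
    if count > k then false
    else
      match pvPlaceCount num count.toNat subs with
      | none => false
      | some subs' => pvLoopA counter k rest subs'

def can_divide_into_increasing_sequences (nums : List Int) (k : Int) : Bool :=
  let counter := PySem.Dict.counter nums
  let sorted_nums := PySem.List.sorted counter.keys (fun x => x) false
  let subsequences := List.replicate k.toNat ([] : List Int)
  pvLoopA counter k sorted_nums subsequences

-- ===== PORT B =====
def can_divide_into_increasing_sequences_alt (nums : List Int) (k : Int) : Bool :=
  (PySem.Dict.counter nums).values.all (fun c => decide (c ≤ k))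

-- ===== PRECONDITION & SPEC =====
def Spec_can_divide_into_increasing_sequences (nums : List Int) (k : Int) (out : Bool) : Prop := out = can_divide_into_increasing_sequences_alt nums k
instance (nums : List Int) (k : Int) (out : Bool) : Decidable (Spec_can_divide_into_increasing_sequences nums k out) := by unfold Spec_can_divide_into_increasing_sequences; infer_instance

-- ===== CLAIM (what is proved, stated in full; the proofs are below) =====
def Claim_equal_can_divide_into_increasing_sequences : Prop := ∀ (nums : List Int) (k : Int), Dom_can_divide_into_increasing_sequences nums k → Spec_can_divide_into_increasing_sequences nums k (can_divide_into_increasing_sequences nums k)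

-- ===== LEMMAS AND PROOFS =====

lemma placeOne_spec (num : Int) : ∀ subs : List (List Int),
    0 < subs.countP (pvAvail num) →
    ∃ subs', pvPlaceOne num subs = some subs'
      ∧ subs'.countP (pvAvail num) + 1 = subs.countP (pvAvail num)
      ∧ subs'.length = subs.length
      ∧ ((∀ s ∈ subs, ∀ x ∈ s, x ≤ num) → ∀ s' ∈ subs', ∀ x ∈ s', x ≤ num) := by
  intro subs
  induction subs with
  | nil => intro h; simp at h
  | cons s rest ih =>
    intro hpos
    by_cases hav : pvAvail num s = true
    · refine ⟨(s ++ [num]) :: rest, ?_, ?_, ?_, ?_⟩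
      · simp [pvPlaceOne, hav]
      · have hnot : pvAvail num (s ++ [num]) = false := by
          simp [pvAvail]
        simp [hav, hnot]
      · simp
      · intro hb s' hs' x hx
        rcases List.mem_cons.mp hs' with rfl | hs'
        · rcases List.mem_append.mp hx with hx | hx
          · exact hb s (by simp) x hx
          · simp at hx; omega
        · exact hb s' (by simp [hs']) x hx
    · have hpos' : 0 < rest.countP (pvAvail num) := by
        simp [hav] at hpos ⊢; omega
      obtain ⟨subs', heq, hcnt, hlen, hbnd⟩ := ih hpos'
      refine ⟨s :: subs', ?_, ?_, ?_, ?_⟩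
      · simp [pvPlaceOne, hav, heq]
      · simp [hav, hcnt]
      · simp [hlen]
      · intro hb s' hs' x hx
        rcases List.mem_cons.mp hs' with rfl | hs'
        · exact hb s' (by simp) x hx
        · exact hbnd (fun t ht y hy => hb t (by simp [ht]) y hy) s' hs' x hx

lemma placeCount_spec (num : Int) : ∀ (c : Nat) (subs : List (List Int)),
    c ≤ subs.countP (pvAvail num) →
    ∃ subs', pvPlaceCount num c subs = some subs'
      ∧ subs'.length = subs.length
      ∧ ((∀ s ∈ subs, ∀ x ∈ s, x ≤ num) → ∀ s' ∈ subs', ∀ x ∈ s', x ≤ num) := by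
  intro c
  induction c with
  | zero => intro subs _; exact ⟨subs, rfl, rfl, fun hb => hb⟩
  | succ c ih =>
    intro subs hle
    obtain ⟨subs1, heq1, hcnt1, hlen1, hbnd1⟩ := placeOne_spec num subs (by omega)
    obtain ⟨subs', heq', hlen', hbnd'⟩ := ih subs1 (by omega)
    exact ⟨subs', by simp [pvPlaceCount, heq1, heq'], hlen'.trans hlen1,
      fun hb => hbnd' (hbnd1 hb)⟩

lemma loopA_spec (nums : List Int) (k : Int) : ∀ (keys : List Int) (subs : List (List Int)),
    keys.Pairwise (· < ·) →
    (∀ s ∈ subs, ∀ x ∈ s, ∀ m ∈ keys, x < m) →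
    subs.length = k.toNat →
    pvLoopA (PySem.Dict.counter nums) k keys subs
      = keys.all (fun num => decide (((nums.count num : Int)) ≤ k)) := by
  intro keys
  induction keys with
  | nil => intro subs _ _ _; simp [pvLoopA]
  | cons num rest ih =>
    intro subs hpw hinv hlen
    have hget : (PySem.Dict.counter nums).getD num 0 = (nums.count num : Int) :=
      PySem.Dict.getD_counter nums num
    by_cases hk : k < (nums.count num : Int)
    · simp [pvLoopA, hget, hk, not_le.mpr hk]
    · rw [not_lt] at hk
      have hav : ∀ s ∈ subs, pvAvail num s = true := by
        intro s hs
        cases hgl : s.getLast? with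
        | none => simp [pvAvail, hgl]
        | some x =>
          have := hinv s hs x (List.mem_of_getLast? hgl) num (by simp)
          simp [pvAvail, hgl, this]
      have hc : (nums.count num : Int).toNat ≤ subs.countP (pvAvail num) := by
        rw [List.countP_eq_length.mpr hav, hlen]; omega
      obtain ⟨subs', heq, hlen', hbnd⟩ := placeCount_spec num _ subs hc
      simp only [Int.toNat_natCast] at heq
      have hb : ∀ s' ∈ subs', ∀ x ∈ s', x ≤ num :=
        hbnd (fun s hs x hx => le_of_lt (hinv s hs x hx num (by simp)))
      have hrec := ih subs' hpw.of_cons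
        (fun s hs x hx m hm => lt_of_le_of_lt (hb s hs x hx)
          ((List.pairwise_cons.mp hpw).1 m hm))
        (hlen'.trans hlen)
      simp [pvLoopA, hget, not_lt.mpr hk, heq, hrec]
      exact fun _ => hk

-- ===== VERDICT (by name: the statement is the Claim_ definition above) =====
theorem can_divide_into_increasing_sequences_spec : Claim_equal_can_divide_into_increasing_sequences := by
  intro nums k _
  unfold Spec_can_divide_into_increasing_sequences
  unfold can_divide_into_increasing_sequences can_divide_into_increasing_sequences_alt
  have hA := loopA_spec nums k
    (PySem.List.sorted (PySem.Dict.counter nums).keys (fun x => x) false)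
    (List.replicate k.toNat ([] : List Int))
    (by rw [PySem.Dict.keys_counter]; exact PySem.List.sorted_ofList_pairwise_lt nums)
    (by intro s hs x hx m hm; rw [List.eq_of_mem_replicate hs] at hx; simp at hx)
    (by simp)
  rw [hA]
  have hperm : (PySem.List.sorted (PySem.Dict.counter nums).keys (fun x => x) false).Perm
      (PySem.Set.ofList nums) := by
    rw [PySem.Dict.keys_counter]
    exact PySem.List.sorted_perm _ _ _
  rw [List.Perm.all_eq hperm]
  have hvals : (PySem.Dict.counter nums).values
      = (PySem.Set.ofList nums).map (fun v => ((nums.count v : Int))) := by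
    show ((PySem.Dict.counter nums).items).map (·.2) = _
    rw [PySem.Dict.items_counter]
    simp
  rw [hvals, List.all_map]
  rfl
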